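-- pv_equiv track=rewrite | github.com/Chemokoren/Algorithms-1 | Bit Manipulation/set_first_i_bits.py | setFirstIBits
-- ===== SOURCE A (Python) =====
-- def setFirstIBits(num, i):
--     number = num
--     count = 0
--     while(num > 0):
--         num = num >> 1
--         count +=1
--
--     mask = (( 1 << i) -1) << (count - i)
--     output = mask | number
--
--     return output
-- ===== SOURCE B (Python) =====
-- def setFirstIBits(num, i):
--     # Set the i leading bits one at a time: add each single bit at its
--     # position below the top, instead of counting bits with a shift loop
--     # and building one contiguous block mask.
--     mask = 0
--     for j in range(i):
--         mask += 1 << (num.bit_length() - 1 - j)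
--     return mask | num
-- ===== Notes on version B (the rewrite author's own statement) =====
-- stated objective: alternative
-- what changed: Instead of counting num's bits with a right-shift loop and OR-ing one contiguous block mask built as ((1<<i)-1)<<(count-i), B sets the i leading bits one at a time, adding a single bit per loop step at a position computed from the builtin bit length.
import Mathlib
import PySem

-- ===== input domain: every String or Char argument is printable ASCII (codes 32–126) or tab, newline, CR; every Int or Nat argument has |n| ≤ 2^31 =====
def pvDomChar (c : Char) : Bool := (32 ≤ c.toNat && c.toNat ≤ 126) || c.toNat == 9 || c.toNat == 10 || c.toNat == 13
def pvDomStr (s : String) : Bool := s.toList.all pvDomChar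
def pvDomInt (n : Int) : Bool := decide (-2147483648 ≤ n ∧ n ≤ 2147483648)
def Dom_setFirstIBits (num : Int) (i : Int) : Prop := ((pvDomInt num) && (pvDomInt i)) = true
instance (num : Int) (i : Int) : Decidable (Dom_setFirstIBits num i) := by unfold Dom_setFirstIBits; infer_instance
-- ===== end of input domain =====

-- B sets the i leading bits one at a time (adding single bits at positions taken from the builtin bit length) instead of counting bits with a shift loop and OR-ing one contiguous block mask; an alternative decomposition, not claimed faster.


-- ===== PORT A =====
-- the while-loop: while num > 0: num = num >> 1; count += 1
def pvCountLoop (num : Int) (count : Int) : Int :=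
  if h : 0 < num then pvCountLoop (num >>> (1:Nat)) (count + 1) else count
termination_by num.toNat
decreasing_by
  have : num >>> (1:Nat) = num / 2 := by
    simpa using Int.shiftRight_eq_div_pow num 1
  omega

def setFirstIBits (num : Int) (i : Int) : Int :=
  let number := num
  let count := pvCountLoop num 0
  let mask := (((1:Int) <<< i.toNat) - 1) <<< (count - i).toNat
  let output := PySem.Int.bor mask number
  output

-- ===== PORT B =====
-- the for-loop: for j in range(i): mask += 1 << (num.bit_length() - 1 - j)
def setFirstIBits_alt (num : Int) (i : Int) : Int :=
  let mask := (PySem.List.pyRange 0 i 1).foldl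
    (fun mask j => mask + (1:Int) <<< ((PySem.Int.bitLength num : Int) - 1 - j).toNat) 0
  PySem.Int.bor mask num

-- ===== PRECONDITION & SPEC =====
-- Pre_ excludes exactly the inputs where Python A raises ValueError (negative shift count):
-- i < 0, or i greater than the bit count A's loop produces.
def Pre_setFirstIBits (num : Int) (i : Int) : Prop :=
  0 ≤ i ∧ i ≤ (if 0 < num then (PySem.Int.bitLength num : Int) else 0)
instance (num : Int) (i : Int) : Decidable (Pre_setFirstIBits num i) := by
  unfold Pre_setFirstIBits; infer_instance
def pvWitness_setFirstIBits : Int × Int := (13, 2)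

def Spec_setFirstIBits (num : Int) (i : Int) (out : Int) : Prop := out = setFirstIBits_alt num i
instance (num : Int) (i : Int) (out : Int) : Decidable (Spec_setFirstIBits num i out) := by unfold Spec_setFirstIBits; infer_instance

-- ===== CLAIM (what is proved, stated in full; the proofs are below) =====
def Claim_equal_setFirstIBits : Prop := ∀ (num : Int) (i : Int), Dom_setFirstIBits num i → Pre_setFirstIBits num i → Spec_setFirstIBits num i (setFirstIBits num i)
-- ===== LEMMAS AND PROOFS =====

lemma pvCountLoop_pos (n : Nat) : ∀ (num : Int), num.toNat = n → 0 < num →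
    ∀ c, pvCountLoop num c = c + (PySem.Int.bitLength num : Int) := by
  induction n using Nat.strong_induction_on with
  | _ n ih =>
    intro num hn hpos c
    have hsh : num >>> (1:Nat) = num / 2 := by
      simpa using Int.shiftRight_eq_div_pow num 1
    rw [pvCountLoop, dif_pos hpos]
    have hfd : PySem.Int.floordiv num 2 = num / 2 :=
      PySem.Int.floordiv_eq_ediv_of_pos (by omega)
    have hbl := PySem.Int.bitLength_of_pos hpos
    by_cases h2 : 0 < num / 2
    · have := ih (num / 2).toNat (by omega) (num / 2) rfl h2 (c + 1)
      rw [hsh, this, hbl, hfd]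
      push_cast; ring
    · have hz : num / 2 = 0 := by omega
      rw [hsh, hz, pvCountLoop, dif_neg (by omega)]
      rw [hbl, hfd, hz]
      simp [PySem.Int.bitLength_zero]

lemma pvCountLoop_eq (num : Int) :
    pvCountLoop num 0 = if 0 < num then (PySem.Int.bitLength num : Int) else 0 := by
  by_cases h : 0 < num
  · rw [if_pos h, pvCountLoop_pos num.toNat num rfl h 0]; ring
  · rw [if_neg h, pvCountLoop, dif_neg h]

-- B's loop: summing the i leading single bits equals A's contiguous block mask
lemma pvBitSum_eq (c : Nat) (k : Nat) (hk : k ≤ c) :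
    (PySem.List.pyRange 0 (k : Int) 1).foldl
      (fun mask j => mask + (1:Int) <<< ((c : Int) - 1 - j).toNat) 0
      = ((1:Int) <<< k - 1) <<< (c - k) := by
  induction k with
  | zero =>
    rw [PySem.List.pyRange_one_eq_nil (by norm_num)]
    simp [Int.shiftLeft_eq]
  | succ k ih =>
    have hsplit : PySem.List.pyRange 0 ((k + 1 : Nat) : Int) 1
        = PySem.List.pyRange 0 (k : Int) 1 ++ [(k : Int)] := by
      push_cast
      exact PySem.List.pyRange_one_succ_right (by positivity)
    rw [hsplit, List.foldl_append, ih (by omega)]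
    simp only [List.foldl_cons, List.foldl_nil]
    have htn : ((c : Int) - 1 - (k : Int)).toNat = c - 1 - k := by omega
    rw [htn]
    simp only [Int.shiftLeft_eq]
    have h1 : c - k = (c - 1 - k) + 1 := by omega
    have h2 : c - (k + 1) = c - 1 - k := by omega
    rw [h1, h2]
    ring

-- ===== VERDICT (by name: the statement is the Claim_ definition above) =====
theorem setFirstIBits_spec : Claim_equal_setFirstIBits := by
  intro num i _ hpre
  obtain ⟨hi0, hile⟩ := hpre
  unfold Spec_setFirstIBits
  simp only [setFirstIBits, setFirstIBits_alt]
  rw [pvCountLoop_eq]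
  by_cases hpos : 0 < num
  · rw [if_pos hpos] at hile ⊢
    rw [show (i : Int) = (i.toNat : Int) by omega,
      pvBitSum_eq (PySem.Int.bitLength num) i.toNat (by omega)]
    congr 2
    omega
  · rw [if_neg hpos] at hile ⊢
    have hi : i = 0 := by omega
    subst hi
    rw [PySem.List.pyRange_one_eq_nil (le_refl _)]
    norm_num [Int.shiftLeft_eq]
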